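-- pv_equiv track=rewrite | github.com/evalf/stringly | stringly.py | protect
-- ===== SOURCE A (Python) =====
-- def isnormal(s):
--   'cheap algorithm to detect strings for which escape is an identity'
--   depth = 0
--   for part in s.split('{'):
--     if depth == 1 and part.startswith('}'): # empty scope at level 0 requires escaping
--       return False
--     depth -= part.count('}')
--     if depth < 0: # negative scope requires escaping
--       return False
--     depth += 1
--   return depth == 1
--
-- def escape(s):
--   'convert to a string with balanced braces and all non-brace characters in non-negative scope'
--   if isnormal(s):
--     return s
--   disbalance = s.count('{') - s.count('}')
--   depth = 0
--   escaped = ''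
--   for c in s:
--     if disbalance and depth == 0 and c == '{}'[disbalance<0]:
--       c += '{}'[disbalance>0] # escape brace
--       disbalance += 1 if disbalance<0 else -1 # reduce disbalance
--     elif c == '{':
--       depth += 1
--       if depth <= 0:
--         c = '{}' # escape opening brace
--     elif c == '}':
--       depth -= 1
--       if depth < 0:
--         c = '}{' # escape closing brace
--       elif depth == 0 and escaped[-1] == '{': # empty scope at level 0
--         c = '}}{' # escape existing opening brace and new closing brace
--     escaped += c
--   assert depth == disbalance == 0
--   return escaped
--
-- def protect(s, c=None):
--   s = str(s)
--   if c is None or not isnormal(s):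
--     return '{' + escape(s) + '}' # always embrace escaped strings to make them normal
--   if s.startswith('{') and s.endswith('}'):
--     return '{' + s + '}'
--   n = 0
--   for part in s.split(c)[:-1]:
--     n += part.count('{') - part.count('}')
--     if not n:
--       return '{' + s + '}'
--   return s
-- ===== SOURCE B (Python) =====
-- def _scan(s):
--     'single depth-walk: None if s needs escaping for scope reasons, else the final depth'
--     depth = 0
--     prev_open = False
--     for ch in s:
--         if ch == '{':
--             depth += 1
--             prev_open = True
--         elif ch == '}':
--             if depth < 1 or (depth == 1 and prev_open):
--                 return None
--             depth -= 1
--             prev_open = False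
--         else:
--             prev_open = False
--     return depth
--
-- def _isnormal(s):
--     return _scan(s) == 0
--
-- def _escape(s):
--     'char-class-first rewrite: branch on the character, track a prev-open flag'
--     if _isnormal(s):
--         return s
--     disb = s.count('{') - s.count('}')
--     depth = 0
--     out = ''
--     prev_open = False
--     for ch in s:
--         if ch == '{':
--             if disb > 0 and depth == 0:
--                 out += '{}'
--                 disb -= 1
--                 prev_open = False
--             else:
--                 depth += 1
--                 if depth > 0:
--                     out += '{'
--                     prev_open = True
--                 else:
--                     out += '{}'
--                     prev_open = False
--         elif ch == '}':
--             if disb < 0 and depth == 0: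
--                 out += '}{'
--                 disb += 1
--                 prev_open = True
--             else:
--                 depth -= 1
--                 if depth < 0:
--                     out += '}{'
--                     prev_open = True
--                 elif depth == 0 and prev_open:
--                     out += '}}{'
--                     prev_open = True
--                 else:
--                     out += '}'
--                     prev_open = False
--         else:
--             out += ch
--             prev_open = False
--     return out
--
-- def _needs_brace(s, c):
--     'scan separator occurrences with str.find, tracking the brace balance'
--     n = 0
--     i = 0
--     while True:
--         j = s.find(c, i)
--         if j < 0:
--             return False
--         n += s.count('{', i, j) - s.count('}', i, j)
--         if n == 0:
--             return True
--         i = j + len(c)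
--
-- def protect(s, c=None):
--     s = str(s)
--     if c is not None and _isnormal(s):
--         if (s.startswith('{') and s.endswith('}')) or _needs_brace(s, c):
--             return '{' + s + '}'
--         return s
--     return '{' + _escape(s) + '}'
-- ===== Notes on version B (the rewrite author's own statement) =====
-- stated objective: alternative
-- what changed: isnormal's split-on-the-open-brace/count pass becomes a single depth walk returning an optional final depth; escape branches on the character class first and tracks a prev-open boolean flag instead of indexing the last accumulated character; protect's split-based balance loop over separator parts becomes a boolean str.find()-based scan over separator occurrences that builds no part list, and protect's branch structure is inverted around one disjunction.
-- outside the precondition, e.g. on protect('{a}', ''): A returns '{{a}}', B returns '{{a}}'; on protect('ab', ''): A raises ValueError, B returns '{ab}'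
import Mathlib
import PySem

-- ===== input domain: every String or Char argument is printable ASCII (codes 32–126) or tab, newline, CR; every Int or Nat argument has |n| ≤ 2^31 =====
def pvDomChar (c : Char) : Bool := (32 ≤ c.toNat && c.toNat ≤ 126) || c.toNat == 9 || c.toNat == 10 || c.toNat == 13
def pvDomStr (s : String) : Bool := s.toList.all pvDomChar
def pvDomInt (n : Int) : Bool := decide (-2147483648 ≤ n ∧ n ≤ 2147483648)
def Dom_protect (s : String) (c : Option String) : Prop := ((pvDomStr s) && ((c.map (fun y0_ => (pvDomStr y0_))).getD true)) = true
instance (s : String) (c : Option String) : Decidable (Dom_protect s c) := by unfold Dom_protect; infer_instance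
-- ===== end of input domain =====

-- B restructures A: isnormal becomes a depth scan returning an optional final depth, escape
-- branches on the character class first and tracks a prev-open flag instead of indexing the
-- accumulated string, and protect's split-based balance loop becomes a boolean find()-based
-- scan over separator occurrences; objective 'alternative', return value proved equal.

-- ===== PORT A =====

-- for part in s.split('{'): ...
def isnormalLoopA : Int → List (List Char) → Bool
  | depth, [] => depth == 1
  | depth, part :: rest =>
    if depth = 1 ∧ PySem.Chars.startswith part ['}'] = true then false
    else if depth - (PySem.Chars.count part ['}'] : Int) < 0 then false
    else isnormalLoopA (depth - (PySem.Chars.count part ['}'] : Int) + 1) rest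

def isnormalA (sl : List Char) : Bool :=
  isnormalLoopA 0 (PySem.Chars.splitOn sl ['{'])

-- for c in s: ... (state: disbalance, depth, escaped)
def escapeLoopA : Int → Int → List Char → List Char → List Char
  | _, _, escaped, [] => escaped
  | disb, depth, escaped, ch :: rest =>
    if disb ≠ 0 ∧ depth = 0 ∧ ch = (if disb < 0 then '}' else '{') then
      escapeLoopA (if disb < 0 then disb + 1 else disb - 1) depth
        (escaped ++ [ch, if disb > 0 then '}' else '{']) rest
    else if ch = '{' then
      escapeLoopA disb (depth + 1)
        (escaped ++ (if depth + 1 ≤ 0 then ['{', '}'] else [ch])) rest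
    else if ch = '}' then
      escapeLoopA disb (depth - 1)
        (escaped ++ (if depth - 1 < 0 then ['}', '{']
          else if depth - 1 = 0 ∧ PySem.List.pyGet? escaped (-1) = some '{' then ['}', '}', '{']
          else [ch])) rest
    else escapeLoopA disb depth (escaped ++ [ch]) rest

def escapeA (sl : List Char) : List Char :=
  if isnormalA sl then sl
  else escapeLoopA ((PySem.Chars.count sl ['{'] : Int) - (PySem.Chars.count sl ['}'] : Int)) 0 [] sl

-- for part in s.split(c)[:-1]: ...
def protectLoopA (sl : List Char) : Int → List (List Char) → List Char
  | _, [] => sl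
  | n, part :: rest =>
    if n + (PySem.Chars.count part ['{'] : Int) - (PySem.Chars.count part ['}'] : Int) = 0 then
      '{' :: sl ++ ['}']
    else protectLoopA sl (n + (PySem.Chars.count part ['{'] : Int) - (PySem.Chars.count part ['}'] : Int)) rest

def protect (s : String) (c : Option String) : String :=
  match c with
  | none => String.ofList ('{' :: escapeA s.toList ++ ['}'])
  | some cstr =>
    if ¬ isnormalA s.toList then String.ofList ('{' :: escapeA s.toList ++ ['}'])
    else if PySem.Chars.startswith s.toList ['{'] = true ∧ PySem.Chars.endswith s.toList ['}'] = true then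
      String.ofList ('{' :: s.toList ++ ['}'])
    else
      match PySem.Chars.split? s.toList cstr.toList with
      | none => s  -- empty separator: Python raises ValueError here; excluded by Pre_protect
      | some parts =>
        String.ofList (protectLoopA s.toList 0 (PySem.List.slice parts none (some (-1))))

-- ===== PORT B =====

-- Source B _scan: one depth walk, none = needs escaping, some d = final depth
def scanB : Int → Bool → List Char → Option Int
  | depth, _, [] => some depth
  | depth, prevOpen, ch :: rest =>
    if ch = '{' then scanB (depth + 1) true rest
    else if ch = '}' then
      if depth < 1 ∨ (depth = 1 ∧ prevOpen = true) then none
      else scanB (depth - 1) false rest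
    else scanB depth false rest

def isnormalB (sl : List Char) : Bool := scanB 0 false sl == some 0

-- Source B _escape: branch on the character class first, prev-open flag instead of escaped[-1]
def escapeLoopB : Int → Int → List Char → Bool → List Char → List Char
  | _, _, out, _, [] => out
  | disb, depth, out, prevOpen, ch :: rest =>
    if ch = '{' then
      if disb > 0 ∧ depth = 0 then
        escapeLoopB (disb - 1) depth (out ++ ['{', '}']) false rest
      else if depth + 1 > 0 then
        escapeLoopB disb (depth + 1) (out ++ ['{']) true rest
      else
        escapeLoopB disb (depth + 1) (out ++ ['{', '}']) false rest
    else if ch = '}' then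
      if disb < 0 ∧ depth = 0 then
        escapeLoopB (disb + 1) depth (out ++ ['}', '{']) true rest
      else if depth - 1 < 0 then
        escapeLoopB disb (depth - 1) (out ++ ['}', '{']) true rest
      else if depth - 1 = 0 ∧ prevOpen = true then
        escapeLoopB disb (depth - 1) (out ++ ['}', '}', '{']) true rest
      else
        escapeLoopB disb (depth - 1) (out ++ ['}']) false rest
    else escapeLoopB disb depth (out ++ [ch]) false rest

def escapeB (sl : List Char) : List Char :=
  if isnormalB sl then sl
  else escapeLoopB ((PySem.Chars.count sl ['{'] : Int) - (PySem.Chars.count sl ['}'] : Int)) 0 [] false sl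

-- Source B _needs_brace's while loop: j = s.find(c, i); the fuel argument only makes the loop
-- total (for nonempty c — guaranteed by Pre_protect — it never runs out, as proved below)
def needsBraceB (sl cl : List Char) : Nat → Int → Int → Bool
  | 0, _, _ => false
  | fuel + 1, n, i =>
    if PySem.Chars.findFrom sl cl i none < 0 then false
    else if n + (PySem.Chars.count (PySem.List.slice sl (some i) (some (PySem.Chars.findFrom sl cl i none))) ['{'] : Int)
            - (PySem.Chars.count (PySem.List.slice sl (some i) (some (PySem.Chars.findFrom sl cl i none))) ['}'] : Int) = 0 then
      true
    else
      needsBraceB sl cl fuel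
        (n + (PySem.Chars.count (PySem.List.slice sl (some i) (some (PySem.Chars.findFrom sl cl i none))) ['{'] : Int)
           - (PySem.Chars.count (PySem.List.slice sl (some i) (some (PySem.Chars.findFrom sl cl i none))) ['}'] : Int))
        (PySem.Chars.findFrom sl cl i none + (cl.length : Int))

def protect_alt (s : String) (c : Option String) : String :=
  match c with
  | some cstr =>
    if isnormalB s.toList then
      if (PySem.Chars.startswith s.toList ['{'] = true ∧ PySem.Chars.endswith s.toList ['}'] = true)
          ∨ needsBraceB s.toList cstr.toList (s.toList.length + 1) 0 0 = true then
        String.ofList ('{' :: s.toList ++ ['}'])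
      else s
    else String.ofList ('{' :: escapeB s.toList ++ ['}'])
  | none => String.ofList ('{' :: escapeB s.toList ++ ['}'])

-- ===== PRECONDITION & SPEC =====
-- Pre_ excludes an empty separator string, on which A raises ValueError (from str.split)
-- whenever the separator branch is reached; B's scan returns the embraced string there.
def Pre_protect (s : String) (c : Option String) : Prop := c ≠ some ""
instance (s : String) (c : Option String) : Decidable (Pre_protect s c) := by
  unfold Pre_protect; infer_instance

def pvWitness_protect : String × Option String := ("a{b}c", some "b")

def Spec_protect (s : String) (c : Option String) (out : String) : Prop := out = protect_alt s c
instance (s : String) (c : Option String) (out : String) : Decidable (Spec_protect s c out) := by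
  unfold Spec_protect; infer_instance

-- ===== CLAIM (what is proved, stated in full; the proofs are below) =====
def Claim_equal_protect : Prop :=
  ∀ (s : String) (c : Option String), Dom_protect s c → Pre_protect s c →
    Spec_protect s c (protect s c)

-- ===== LEMMAS AND PROOFS =====

theorem countGo_single (ch : Char) : ∀ (fuel : Nat) (l : List Char) (acc : Nat),
    l.length ≤ fuel → PySem.Chars.count.go [ch] fuel l acc = acc + l.count ch
  | 0, l, acc, h => by
    have : l = [] := List.eq_nil_of_length_eq_zero (Nat.le_zero.mp h)
    subst this; simp [PySem.Chars.count.go]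
  | fuel + 1, [], acc, h => by simp [PySem.Chars.count.go]
  | fuel + 1, c :: rest, acc, h => by
    rw [PySem.Chars.count.go]
    simp only [List.isPrefixOf, Bool.and_true]
    have hlen : rest.length ≤ fuel := by simpa using h
    by_cases hc : ch = c
    · subst hc
      rw [if_pos (by simp)]
      show PySem.Chars.count.go [ch] fuel rest (acc+1) = _
      rw [countGo_single ch fuel rest (acc + 1) hlen, List.count_cons_self]
      omega
    · rw [if_neg (by simpa using hc)]
      rw [countGo_single ch fuel rest acc hlen]
      rw [List.count_cons_of_ne (by exact fun hh => hc hh.symm)]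

theorem count_single (l : List Char) (ch : Char) :
    PySem.Chars.count l [ch] = l.count ch := by
  simp [PySem.Chars.count, countGo_single ch l.length l 0 le_rfl]

-- proof-side reformulation of s.split(sep) for a nonempty separator c0 :: ctl
def spG (c0 : Char) (ctl : List Char) : List Char → List (List Char)
  | [] => [[]]
  | ch :: rest =>
    if (c0 :: ctl).isPrefixOf (ch :: rest) then
      [] :: spG c0 ctl (rest.drop ctl.length)
    else (spG c0 ctl rest).modifyHead (ch :: ·)
  termination_by l => l.length
  decreasing_by all_goals (simp; try omega)

theorem spG_ne_nil (c0 : Char) (ctl : List Char) : ∀ (l : List Char), spG c0 ctl l ≠ []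
  | [] => by simp [spG]
  | ch :: rest => by
    rw [spG]
    split
    · simp
    · have hne := spG_ne_nil c0 ctl rest
      cases hr : spG c0 ctl rest with
      | nil => exact absurd hr hne
      | cons p ps => simp
  termination_by l => l.length
  decreasing_by simp

theorem splitOnGo_eq_spG (c0 : Char) (ctl : List Char) :
    ∀ (fuel : Nat) (l cur : List Char) (acc : List (List Char)), l.length < fuel →
    PySem.Chars.splitOn.go (c0 :: ctl) fuel l cur acc =
      acc.reverse ++ (spG c0 ctl l).modifyHead (cur.reverse ++ ·)
  | 0, l, cur, acc, h => by omega
  | fuel + 1, [], cur, acc, h => by simp [PySem.Chars.splitOn.go, spG]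
  | fuel + 1, ch :: rest, cur, acc, h => by
    rw [PySem.Chars.splitOn.go, spG]
    by_cases hp : (c0 :: ctl).isPrefixOf (ch :: rest)
    · rw [if_pos hp, if_pos hp]
      have hd : (List.drop (c0 :: ctl).length (ch :: rest)) = rest.drop ctl.length := by simp
      rw [hd, splitOnGo_eq_spG c0 ctl fuel (rest.drop ctl.length) [] (cur.reverse :: acc)
        (by simp at h ⊢; omega)]
      obtain ⟨p, ps, hps⟩ := List.exists_cons_of_ne_nil (spG_ne_nil c0 ctl (rest.drop ctl.length))
      rw [hps]
      simp
    · rw [if_neg hp, if_neg hp]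
      rw [splitOnGo_eq_spG c0 ctl fuel rest (ch :: cur) acc (by simp at h ⊢; omega)]
      obtain ⟨p, ps, hps⟩ := List.exists_cons_of_ne_nil (spG_ne_nil c0 ctl rest)
      rw [hps]
      simp

theorem splitOn_eq_spG (l : List Char) (c0 : Char) (ctl : List Char) :
    PySem.Chars.splitOn l (c0 :: ctl) = spG c0 ctl l := by
  rw [PySem.Chars.splitOn, splitOnGo_eq_spG c0 ctl (l.length + 1) l [] [] (by omega)]
  obtain ⟨p, ps, hps⟩ := List.exists_cons_of_ne_nil (spG_ne_nil c0 ctl l)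
  rw [hps]; simp

theorem startswith_single_iff (p : List Char) (ch : Char) :
    (PySem.Chars.startswith p [ch] = true) ↔ p.head? = some ch := by
  cases p with
  | nil => simp [PySem.Chars.startswith]
  | cons c r =>
    simp only [PySem.Chars.startswith]
    simp
    exact eq_comm

-- A's isnormal, reformulated char by char (same check order as the split version)
def bodyA : Int → List Char → Bool
  | depth, [] => depth + 1 == 1
  | depth, ch :: rest =>
    if ch = '{' then
      if depth < 0 then false
      else if depth + 1 = 1 ∧ rest.head? = some '}' then false
      else bodyA (depth + 1) rest
    else if ch = '}' then
      if depth - 1 < 0 then false else bodyA (depth - 1) rest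
    else bodyA depth rest

-- the tail of A's per-part step: subtract the '}' count, test, +1, continue
def partTailA (depth : Int) : List (List Char) → Bool
  | [] => true
  | p :: rest =>
    if depth - (p.count '}' : Int) < 0 then false
    else isnormalLoopA (depth - (p.count '}' : Int) + 1) rest

theorem spG_headI_head? (l : List Char) :
    (spG '{' [] l).headI.head? = if l.head? = some '{' then none else l.head? := by
  cases l with
  | nil => simp [spG]
  | cons ch rest =>
    rw [spG]
    by_cases hc : ch = '{'
    · subst hc; simp
    · rw [if_neg (by simpa using Ne.symm hc)]
      obtain ⟨p, ps, hps⟩ := List.exists_cons_of_ne_nil (spG_ne_nil '{' [] rest)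
      rw [hps]
      simp [hc]

theorem isnormalLoopA_spG (l : List Char) (depth : Int) :
    isnormalLoopA depth (spG '{' [] l) =
      if depth = 1 ∧ (spG '{' [] l).headI.head? = some '}' then false
      else partTailA depth (spG '{' [] l) := by
  obtain ⟨p, ps, hps⟩ := List.exists_cons_of_ne_nil (spG_ne_nil '{' [] l)
  rw [hps, isnormalLoopA, partTailA]
  simp only [count_single, startswith_single_iff, List.headI]
  rfl

theorem bodyA_eq_partTailA : ∀ (l : List Char) (depth : Int),
    bodyA depth l = partTailA depth (spG '{' [] l)
  | [], depth => by
    rw [bodyA, spG, partTailA]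
    simp only [List.count_nil, Nat.cast_zero, sub_zero]
    by_cases hd : depth < 0
    · rw [if_pos hd]
      rw [Bool.eq_false_iff]
      simp only [ne_eq, beq_iff_eq]
      omega
    · rw [if_neg hd, isnormalLoopA]
  | ch :: rest, depth => by
    rw [bodyA, spG]
    by_cases hc : ch = '{'
    · subst hc
      rw [if_pos rfl,
        if_pos (show (['{'].isPrefixOf ('{' :: rest)) = true by simp [List.isPrefixOf]),
        partTailA]
      simp only [List.count_nil, Nat.cast_zero, sub_zero, List.length_nil, List.drop_zero]
      by_cases hd : depth < 0
      · rw [if_pos hd, if_pos hd]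
      · rw [if_neg hd, if_neg hd]
        rw [isnormalLoopA_spG, spG_headI_head?]
        rw [bodyA_eq_partTailA rest (depth + 1)]
        by_cases h1 : depth + 1 = 1 ∧ rest.head? = some '}'
        · rw [if_pos h1]
          have hne : rest.head? ≠ some '{' := by simp [h1.2]
          rw [if_neg hne, if_pos ⟨h1.1, h1.2⟩]
        · rw [if_neg h1]
          by_cases hh : rest.head? = some '{'
          · rw [if_pos hh, if_neg (show ¬(depth + 1 = 1 ∧ (none : Option Char) = some '}') by
              simp)]
          · rw [if_neg hh, if_neg h1]
    · rw [if_neg hc,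
        if_neg (show ¬((['{'].isPrefixOf (ch :: rest)) = true) by
          simpa [List.isPrefixOf] using Ne.symm hc)]
      obtain ⟨p, ps, hps⟩ := List.exists_cons_of_ne_nil (spG_ne_nil '{' [] rest)
      rw [hps]
      simp only [List.modifyHead]
      by_cases hcc : ch = '}'
      · subst hcc
        rw [if_pos rfl, partTailA, List.count_cons_self]
        by_cases hd : depth - 1 < 0
        · rw [if_pos hd, if_pos (by push_cast; omega)]
        · rw [if_neg hd, bodyA_eq_partTailA rest (depth - 1), hps, partTailA]
          have harith : depth - 1 - (List.count '}' p : Int) =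
              depth - ((List.count '}' p + 1 : Nat) : Int) := by push_cast; ring
          rw [harith]
      · rw [if_neg hcc, partTailA, List.count_cons_of_ne (show ch ≠ ('}' : Char) from hcc)]
        rw [bodyA_eq_partTailA rest depth, hps, partTailA]

theorem scanB_eq_bodyA : ∀ (l : List Char) (depth : Int) (prevOpen : Bool),
    0 ≤ depth → (prevOpen = true → ¬(depth = 1 ∧ l.head? = some '}')) →
    (scanB depth prevOpen l == some 0) = bodyA depth l
  | [], depth, prevOpen, h0, hp => by
    rw [scanB, bodyA, Bool.eq_iff_iff]
    simp only [beq_iff_eq, Option.some.injEq]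
    omega
  | ch :: rest, depth, prevOpen, h0, hp => by
    rw [scanB, bodyA]
    by_cases hc : ch = '{'
    · subst hc
      rw [if_pos rfl, if_pos rfl, if_neg (show ¬depth < 0 by omega)]
      by_cases h1 : depth + 1 = 1 ∧ rest.head? = some '}'
      · rw [if_pos h1]
        obtain ⟨hd1, hh⟩ := h1
        cases rest with
        | nil => simp at hh
        | cons a r2 =>
          have ha : a = '}' := by simpa using hh
          subst ha
          rw [scanB,
            if_neg (show ¬('}' : Char) = '{' by decide), if_pos rfl,
            if_pos (Or.inr ⟨by omega, rfl⟩)]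
          rfl
      · rw [if_neg h1]
        exact scanB_eq_bodyA rest (depth + 1) true (by omega) (fun _ => h1)
    · rw [if_neg hc, if_neg hc]
      by_cases hcc : ch = '}'
      · subst hcc
        rw [if_pos rfl, if_pos rfl]
        by_cases hd : depth - 1 < 0
        · rw [if_pos (Or.inl (by omega)), if_pos hd]
          rfl
        · rw [if_neg (show ¬(depth < 1 ∨ (depth = 1 ∧ prevOpen = true)) by
            rintro (h | ⟨hd1, hpo⟩)
            · omega
            · exact hp hpo ⟨hd1, rfl⟩), if_neg hd]
          exact scanB_eq_bodyA rest (depth - 1) false (by omega) (by simp)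
      · rw [if_neg hcc, if_neg hcc]
        exact scanB_eq_bodyA rest depth false h0 (by simp)

theorem isnormal_eq (sl : List Char) : isnormalA sl = isnormalB sl := by
  rw [isnormalA, isnormalB, splitOn_eq_spG, isnormalLoopA_spG,
    scanB_eq_bodyA sl 0 false le_rfl (by simp), bodyA_eq_partTailA,
    if_neg (show ¬((0 : Int) = 1 ∧ (spG '{' [] sl).headI.head? = some '}') from
      fun h => by simpa using h.1)]

theorem pyGet?_neg_one (l : List Char) : PySem.List.pyGet? l (-1) = l.getLast? := by
  simp only [PySem.List.pyGet?, PySem.List.pyIdx?]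
  cases l with
  | nil => simp
  | cons a t => simp [List.getLast?_eq_getElem?]

theorem getLast?_append_right (l p : List Char) (h : p ≠ []) :
    (l ++ p).getLast? = p.getLast? := by
  rw [List.getLast?_append]
  cases hp : p.getLast? with
  | none => exact absurd (List.getLast?_eq_none_iff.mp hp) h
  | some a => rfl

theorem escapeLoopA_eq_B : ∀ (l : List Char) (disb depth : Int) (acc : List Char),
    escapeLoopA disb depth acc l = escapeLoopB disb depth acc (acc.getLast? == some '{') l
  | [], disb, depth, acc => by rw [escapeLoopA, escapeLoopB]
  | ch :: rest, disb, depth, acc => by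
    rw [escapeLoopA, escapeLoopB]
    by_cases hb1 : disb ≠ 0 ∧ depth = 0 ∧ ch = (if disb < 0 then '}' else '{')
    · obtain ⟨hdne, hdep, hch⟩ := hb1
      rw [if_pos (show disb ≠ 0 ∧ depth = 0 ∧ ch = (if disb < 0 then '}' else '{') from
        ⟨hdne, hdep, hch⟩)]
      by_cases hneg : disb < 0
      · rw [if_pos hneg] at hch
        subst hch
        rw [if_pos hneg, if_neg (show ¬disb > 0 by omega)]
        rw [if_neg (show ¬('}' : Char) = '{' by decide), if_pos (show ('}' : Char) = '}' from rfl),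
          if_pos (show disb < 0 ∧ depth = 0 from ⟨hneg, hdep⟩)]
        rw [escapeLoopA_eq_B rest (disb + 1) depth (acc ++ ['}', '{'])]
        rw [getLast?_append_right _ _ (by simp)]
        simp
      · rw [if_neg hneg] at hch
        subst hch
        rw [if_neg hneg, if_pos (show disb > 0 by omega)]
        rw [if_pos (show ('{' : Char) = '{' from rfl),
          if_pos (show disb > 0 ∧ depth = 0 from ⟨by omega, hdep⟩)]
        rw [escapeLoopA_eq_B rest (disb - 1) depth (acc ++ ['{', '}'])]
        rw [getLast?_append_right _ _ (by simp)]
        simp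
    · rw [if_neg hb1]
      by_cases hc : ch = '{'
      · subst hc
        rw [if_pos rfl, if_pos rfl,
          if_neg (show ¬(disb > 0 ∧ depth = 0) from fun hco =>
            hb1 ⟨by omega, hco.2, by rw [if_neg (show ¬disb < 0 by omega)]⟩)]
        by_cases hd : depth + 1 ≤ 0
        · rw [if_pos hd, if_neg (show ¬depth + 1 > 0 by omega)]
          rw [escapeLoopA_eq_B rest disb (depth + 1) (acc ++ ['{', '}'])]
          rw [getLast?_append_right _ _ (by simp)]
          simp
        · rw [if_neg hd, if_pos (show depth + 1 > 0 by omega)]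
          rw [escapeLoopA_eq_B rest disb (depth + 1) (acc ++ ['{'])]
          rw [getLast?_append_right _ _ (by simp)]
          simp
      · rw [if_neg hc, if_neg hc]
        by_cases hcc : ch = '}'
        · subst hcc
          rw [if_pos rfl, if_pos rfl,
            if_neg (show ¬(disb < 0 ∧ depth = 0) from fun hco =>
              hb1 ⟨by omega, hco.2, by rw [if_pos hco.1]⟩)]
          by_cases hd : depth - 1 < 0
          · rw [if_pos hd, if_pos hd]
            rw [escapeLoopA_eq_B rest disb (depth - 1) (acc ++ ['}', '{'])]
            rw [getLast?_append_right _ _ (by simp)]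
            simp
          · rw [if_neg hd, if_neg hd, pyGet?_neg_one]
            by_cases he : depth - 1 = 0 ∧ acc.getLast? = some '{'
            · rw [if_pos he, if_pos (show depth - 1 = 0 ∧ (acc.getLast? == some '{') = true from
                ⟨he.1, by simp [he.2]⟩)]
              rw [escapeLoopA_eq_B rest disb (depth - 1) (acc ++ ['}', '}', '{'])]
              rw [getLast?_append_right _ _ (by simp)]
              simp
            · rw [if_neg he,
                if_neg (show ¬(depth - 1 = 0 ∧ (acc.getLast? == some '{') = true) by
                  simpa using he)]
              rw [escapeLoopA_eq_B rest disb (depth - 1) (acc ++ ['}'])]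
              rw [getLast?_append_right _ _ (by simp)]
              simp
        · rw [if_neg hcc, if_neg hcc]
          rw [escapeLoopA_eq_B rest disb depth (acc ++ [ch])]
          rw [getLast?_append_right _ _ (by simp)]
          have hb : ((some ch == some '{') : Bool) = false := by simp [hc]
          simp only [List.getLast?_singleton, hb]

theorem escape_eq (sl : List Char) : escapeA sl = escapeB sl := by
  rw [escapeA, escapeB, isnormal_eq]
  by_cases hn : isnormalB sl = true
  · rw [if_pos hn, if_pos hn]
  · rw [if_neg hn, if_neg hn]
    rw [escapeLoopA_eq_B sl _ 0 []]
    rfl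

theorem spG_of_not_infix (c0 : Char) (ctl : List Char) : ∀ (u : List Char),
    ¬ (c0 :: ctl) <:+: u → spG c0 ctl u = [u]
  | [], h => by simp [spG]
  | ch :: rest, h => by
    rw [spG, if_neg (by
      intro hp
      exact h (List.IsPrefix.isInfix (List.isPrefixOf_iff_prefix.mp hp)))]
    rw [spG_of_not_infix c0 ctl rest (fun hi => h (hi.trans (List.suffix_cons ch rest).isInfix))]
    rfl

theorem spG_first_occ (c0 : Char) (ctl : List Char) : ∀ (u : List Char) (j : Nat),
    (c0 :: ctl) <+: u.drop j → (∀ i < j, ¬ (c0 :: ctl) <+: u.drop i) →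
    spG c0 ctl u = u.take j :: spG c0 ctl (u.drop (j + ctl.length + 1))
  | [], j, hj, hmin => by
    exfalso
    simp at hj
  | ch :: rest, 0, hj, hmin => by
    rw [spG, if_pos (List.isPrefixOf_iff_prefix.mpr (by simpa using hj))]
    simp
  | ch :: rest, j + 1, hj, hmin => by
    rw [spG, if_neg (fun hp =>
      hmin 0 (by omega) (by simpa using List.isPrefixOf_iff_prefix.mp hp))]
    rw [spG_first_occ c0 ctl rest j (by simpa using hj)
      (fun i hi => by simpa using hmin (i + 1) (by omega))]
    simp only [List.modifyHead, List.take_succ_cons]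
    congr 1
    rw [show j + 1 + ctl.length + 1 = (j + ctl.length + 1) + 1 by omega, List.drop_succ_cons]

theorem needsBraceB_eq (sl : List Char) (c0 : Char) (ctl : List Char) :
    ∀ (fuel : Nat) (i : Nat) (n : Int), i ≤ sl.length → sl.length - i < fuel →
    protectLoopA sl n (PySem.List.slice (spG c0 ctl (sl.drop i)) none (some (-1))) =
      (if needsBraceB sl (c0 :: ctl) fuel n (i : Int) = true then '{' :: sl ++ ['}'] else sl)
  | 0, i, n, hi, hf => absurd hf (Nat.not_lt_zero _)
  | fuel + 1, i, n, hi, hf => by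
    rw [needsBraceB, PySem.Chars.findFrom_natCast sl (c0 :: ctl) i hi]
    by_cases h1 : PySem.Chars.find (sl.drop i) (c0 :: ctl) = -1
    · rw [if_pos (show (if PySem.Chars.find (List.drop i sl) (c0 :: ctl) = -1 then (-1 : Int)
          else (i : Int) + PySem.Chars.find (List.drop i sl) (c0 :: ctl)) < 0 from by
        rw [if_pos h1]; norm_num)]
      rw [spG_of_not_infix c0 ctl _ ((PySem.Chars.find_eq_neg_one_iff _ _).mp h1),
        PySem.List.slice_to_neg_one]
      simp [protectLoopA]
    · have h0 : 0 ≤ PySem.Chars.find (sl.drop i) (c0 :: ctl) := by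
        have := PySem.Chars.neg_one_le_find (sl.drop i) (c0 :: ctl)
        omega
      obtain ⟨fn, hfn⟩ : ∃ fn : Nat, PySem.Chars.find (sl.drop i) (c0 :: ctl) = (fn : Int) :=
        ⟨_, (Int.toNat_of_nonneg h0).symm⟩
      obtain ⟨hpre, hmin⟩ := PySem.Chars.find_spec (s := sl.drop i) (sub := c0 :: ctl) h0
      rw [hfn] at hpre hmin
      simp only [Int.toNat_natCast] at hpre hmin
      rw [if_neg (show ¬ (if PySem.Chars.find (List.drop i sl) (c0 :: ctl) = -1 then (-1 : Int)
          else (i : Int) + PySem.Chars.find (List.drop i sl) (c0 :: ctl)) < 0 from by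
        rw [if_neg h1, hfn]; omega)]
      rw [if_neg h1, hfn]
      rw [PySem.List.slice_natCast_add]
      have hlenc : i + fn + (ctl.length + 1) ≤ sl.length := by
        have hle := hpre.length_le
        simp only [List.length_cons, List.length_drop] at hle
        omega
      rw [spG_first_occ c0 ctl (sl.drop i) fn hpre hmin]
      rw [PySem.List.slice_to_neg_one,
        List.dropLast_cons_of_ne_nil (spG_ne_nil c0 ctl _)]
      rw [protectLoopA]
      simp only [count_single]
      by_cases hz : n + ((List.drop i sl).take fn |>.count '{' : Int)
          - ((List.drop i sl).take fn |>.count '}' : Int) = 0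
      · rw [if_pos hz, if_pos hz]
        simp
      · rw [if_neg hz, if_neg hz]
        have hrec := needsBraceB_eq sl c0 ctl fuel (i + fn + (ctl.length + 1))
          (n + ((List.drop i sl).take fn |>.count '{' : Int)
             - ((List.drop i sl).take fn |>.count '}' : Int))
          (by omega) (by omega)
        have hcast : ((i : Int) + (fn : Int) + ((c0 :: ctl).length : Int))
            = ((i + fn + (ctl.length + 1) : Nat) : Int) := by push_cast [List.length_cons]; ring
        rw [hcast, List.drop_drop,
          show i + (fn + ctl.length + 1) = i + fn + (ctl.length + 1) from by omega,
          ← PySem.List.slice_to_neg_one]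
        exact hrec

-- ===== VERDICT (by name: the statement is the Claim_ definition above) =====
theorem protect_spec : Claim_equal_protect := by
  intro s c hdom hpre
  unfold Spec_protect
  cases c with
  | none =>
    show String.ofList ('{' :: escapeA s.toList ++ ['}']) =
      String.ofList ('{' :: escapeB s.toList ++ ['}'])
    rw [escape_eq]
  | some cstr =>
    have hcl : cstr.toList ≠ [] := by
      intro h
      exact hpre (by rw [show cstr = "" from by simpa using congrArg String.ofList h])
    obtain ⟨c0, ctl, hc⟩ := List.exists_cons_of_ne_nil hcl
    show (if ¬ isnormalA s.toList = true then String.ofList ('{' :: escapeA s.toList ++ ['}'])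
      else if PySem.Chars.startswith s.toList ['{'] = true ∧ PySem.Chars.endswith s.toList ['}'] = true then
        String.ofList ('{' :: s.toList ++ ['}'])
      else
        match PySem.Chars.split? s.toList cstr.toList with
        | none => s
        | some parts =>
          String.ofList (protectLoopA s.toList 0 (PySem.List.slice parts none (some (-1))))) =
      (if isnormalB s.toList = true then
        if (PySem.Chars.startswith s.toList ['{'] = true ∧ PySem.Chars.endswith s.toList ['}'] = true)
            ∨ needsBraceB s.toList cstr.toList (s.toList.length + 1) 0 0 = true then
          String.ofList ('{' :: s.toList ++ ['}'])
        else s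
      else String.ofList ('{' :: escapeB s.toList ++ ['}']))
    rw [isnormal_eq]
    by_cases hn : isnormalB s.toList = true
    · rw [if_neg (not_not_intro hn), if_pos hn]
      by_cases hsw : PySem.Chars.startswith s.toList ['{'] = true ∧
          PySem.Chars.endswith s.toList ['}'] = true
      · rw [if_pos hsw, if_pos (Or.inl hsw)]
      · rw [if_neg hsw]
        rw [hc, PySem.Chars.split?]
        simp only [List.isEmpty_cons, Bool.false_eq_true, if_false]
        rw [splitOn_eq_spG]
        have hsc := needsBraceB_eq s.toList c0 ctl (s.toList.length + 1) 0 0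
          (Nat.zero_le _) (by omega)
        simp only [Nat.cast_zero, List.drop_zero] at hsc
        rw [hsc]
        by_cases hnb : needsBraceB s.toList (c0 :: ctl) (s.toList.length + 1) 0 0 = true
        · rw [if_pos hnb, if_pos (Or.inr hnb)]
        · rw [if_neg hnb, if_neg (not_or_intro hsw hnb)]
          exact String.ofList_toList
    · rw [if_pos hn, if_neg hn, escape_eq]
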